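-- pv_equiv track=rewrite | github.com/boa9448/record_mecro | src/recorder.py | event_time_to_delay
-- ===== SOURCE A (Python) =====
-- def event_time_to_delay(record : list[tuple]) -> list[tuple]:
--     new_record = []
--     count = len(record)
--
--     for idx in range(count):
--         *cur_args, cur_event_time = record[idx]
--         if idx == count - 1:
--             new_record.append((*cur_args, 0))
--             break
--
--         *next_args, next_event_time = record[idx + 1]
--
--         delay = next_event_time - cur_event_time
--         new_record.append((*cur_args, delay))
--
--     return new_record
-- ===== SOURCE B (Python) =====
-- def event_time_to_delay(record : list[tuple]) -> list[tuple]: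
--     # Traverse the events from last to first, carrying the time of the event
--     # that FOLLOWS the current one; build the output back-to-front and reverse.
--     out = []
--     next_time = None
--     for ev in reversed(record):
--         *args, t = ev
--         out.append((*args, 0 if next_time is None else next_time - t))
--         next_time = t
--     out.reverse()
--     return out
-- ===== Notes on version B (the rewrite author's own statement) =====
-- stated objective: alternative
-- what changed: Replaces A's forward index loop with lookahead record[idx+1] and a last-index break by a reverse traversal that carries the following event's time as state (no indexing, no lookahead), building the output back-to-front and reversing it once at the end.
import Mathlib
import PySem

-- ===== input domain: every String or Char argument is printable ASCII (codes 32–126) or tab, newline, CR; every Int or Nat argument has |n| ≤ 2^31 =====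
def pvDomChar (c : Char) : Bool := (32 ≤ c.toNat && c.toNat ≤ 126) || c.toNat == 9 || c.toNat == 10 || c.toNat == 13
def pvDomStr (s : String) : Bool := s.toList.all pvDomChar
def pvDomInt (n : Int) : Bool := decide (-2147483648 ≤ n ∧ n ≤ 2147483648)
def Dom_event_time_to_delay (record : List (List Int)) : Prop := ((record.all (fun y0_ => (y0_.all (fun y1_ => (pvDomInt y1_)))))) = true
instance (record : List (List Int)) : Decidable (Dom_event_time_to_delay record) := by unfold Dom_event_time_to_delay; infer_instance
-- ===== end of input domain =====

-- B replaces A's forward index loop with lookahead by a reverse traversal carrying the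
-- following event's time as state, building the output back-to-front: objective 'alternative'.

-- ===== PORT A =====
-- A's for-loop over range(count) with a break at the last index; tuple unpacking
-- '*cur_args, cur_time = t' is t.dropLast / t.getLast? (getLast? = none is Python's
-- ValueError on an empty tuple, excluded by Pre_; the port then stops with what was
-- accumulated — unreachable inside Pre_).
def eventLoopA (record : List (List Int)) (count : Int) : List Int → List (List Int) → List (List Int)
  | [], new_record => new_record
  | idx :: rest, new_record =>
    match PySem.List.pyGet? record idx with
    | none => new_record
    | some cur =>
      match cur.getLast? with
      | none => new_record
      | some cur_event_time =>
        let cur_args := cur.dropLast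
        if idx = count - 1 then
          new_record ++ [cur_args ++ [0]]      -- append then break
        else
          match PySem.List.pyGet? record (idx + 1) with
          | none => new_record
          | some next =>
            match next.getLast? with
            | none => new_record
            | some next_event_time =>
              let delay := next_event_time - cur_event_time
              eventLoopA record count rest (new_record ++ [cur_args ++ [delay]])

def event_time_to_delay (record : List (List Int)) : List (List Int) :=
  let count : Int := record.length
  eventLoopA record count (PySem.List.pyRange 0 count 1) []

-- ===== PORT B =====
-- One step of B's loop over reversed(record): state is (out, next_time); '*args, t = ev'
-- is ev.dropLast / ev.getLast? (getD 0 is unreachable inside Pre_: no empty event tuple).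
def bStep (st : List (List Int) × Option Int) (ev : List Int) : List (List Int) × Option Int :=
  let t := ev.getLast?.getD 0
  (st.1 ++ [ev.dropLast ++ [match st.2 with | none => 0 | some nt => nt - t]], some t)

def event_time_to_delay_alt (record : List (List Int)) : List (List Int) :=
  (record.reverse.foldl bStep ([], none)).1.reverse

-- ===== PRECONDITION & SPEC =====
-- Pre_ excludes records containing an empty event tuple: there Python's starred
-- unpacking raises ValueError in both A and B.
def Pre_event_time_to_delay (record : List (List Int)) : Prop :=
  ∀ l ∈ record, l ≠ []
instance (record : List (List Int)) : Decidable (Pre_event_time_to_delay record) := by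
  unfold Pre_event_time_to_delay; infer_instance

def pvWitness_event_time_to_delay : List (List Int) := [[1, 2, 10], [3, 20], [4, 25]]

def Spec_event_time_to_delay (record : List (List Int)) (out : List (List Int)) : Prop :=
  out = event_time_to_delay_alt record
instance (record : List (List Int)) (out : List (List Int)) : Decidable (Spec_event_time_to_delay record out) := by
  unfold Spec_event_time_to_delay; infer_instance

-- ===== CLAIM (what is proved, stated in full; the proofs are below) =====
def Claim_equal_event_time_to_delay : Prop :=
  ∀ (record : List (List Int)), Dom_event_time_to_delay record →
    Pre_event_time_to_delay record →
    Spec_event_time_to_delay record (event_time_to_delay record)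

-- ===== LEMMAS AND PROOFS =====

-- Structural pairwise characterisation both ports are reduced to.
def pairSpec : List (List Int) → List (List Int)
  | [] => []
  | [l] => [l.dropLast ++ [0]]
  | cur :: nxt :: rest =>
      (cur.dropLast ++ [nxt.getLast?.getD 0 - cur.getLast?.getD 0]) :: pairSpec (nxt :: rest)

theorem bLoop_spec : ∀ record : List (List Int),
    (record.reverse.foldl bStep ([], none)).1.reverse = pairSpec record ∧
    (record.reverse.foldl bStep ([], none)).2
      = record.head?.map (fun l => l.getLast?.getD 0) := by
  intro record
  induction record with
  | nil => simp [pairSpec]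
  | cons cur rest ih =>
    have hsplit : (cur :: rest).reverse = rest.reverse ++ [cur] := by simp
    rw [hsplit, List.foldl_append]
    obtain ⟨ih1, ih2⟩ := ih
    cases rest with
    | nil =>
      simp [bStep, pairSpec]
    | cons nxt r =>
      rw [List.reverse_cons] at ih1 ih2
      constructor
      · simp only [List.foldl_cons, List.foldl_nil, bStep, List.reverse_append,
          List.reverse_cons, List.reverse_nil, List.nil_append, List.cons_append]
        rw [ih2]
        simp only [List.head?_cons, Option.map_some]
        simp [pairSpec, ← ih1]
      · simp [bStep]

theorem alt_eq_pairSpec : ∀ record : List (List Int),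
    event_time_to_delay_alt record = pairSpec record := by
  intro record
  exact (bLoop_spec record).1

theorem loopA_eq_pairSpec : ∀ (suf pre acc : List (List Int)),
    (∀ l ∈ suf, l ≠ []) →
    eventLoopA (pre ++ suf) ((pre ++ suf).length : Int)
      (PySem.List.pyRange (pre.length : Int) ((pre ++ suf).length : Int) 1) acc
      = acc ++ pairSpec suf := by
  intro suf
  induction suf with
  | nil =>
    intro pre acc _
    rw [PySem.List.pyRange_one_eq_nil (by simp)]
    simp [eventLoopA, pairSpec]
  | cons cur tail ih =>
    intro pre acc hpre
    have hcur : cur ≠ [] := hpre cur (by simp)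
    obtain ⟨ct, hct⟩ : ∃ x, cur.getLast? = some x := by
      cases h : cur.getLast? with
      | none => exact absurd (List.getLast?_eq_none_iff.mp h) hcur
      | some x => exact ⟨x, rfl⟩
    cases tail with
    | nil =>
      have hlen : ((pre ++ [cur]).length : Int) = (pre.length : Int) + 1 := by
        simp
      rw [hlen, PySem.List.pyRange_one_cons (by omega)]
      rw [PySem.List.pyRange_one_eq_nil (by omega)]
      simp only [eventLoopA, PySem.List.pyGet?_append_length, hct]
      rw [if_pos (by omega)]
      simp [pairSpec]
    | cons nxt rest =>
      have hnxt : nxt ≠ [] := hpre nxt (by simp)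
      obtain ⟨nt, hnt⟩ : ∃ x, nxt.getLast? = some x := by
        cases h : nxt.getLast? with
        | none => exact absurd (List.getLast?_eq_none_iff.mp h) hnxt
        | some x => exact ⟨x, rfl⟩
      have hlen : ((pre ++ cur :: nxt :: rest).length : Int)
          = (pre.length : Int) + 2 + (rest.length : Int) := by
        simp; omega
      rw [PySem.List.pyRange_one_cons (by rw [hlen]; omega)]
      simp only [eventLoopA, PySem.List.pyGet?_append_length, hct]
      rw [if_neg (by rw [hlen]; omega)]
      have hget1 : PySem.List.pyGet? (pre ++ cur :: nxt :: rest) ((pre.length : Int) + 1)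
          = some nxt := by
        rw [show ((pre.length : Int) + 1) = ((pre.length : Int) + (1 : Nat)) by norm_num,
          PySem.List.pyGet?_append_right]
        rfl
      rw [hget1]
      simp only [hnt]
      have hrec : pre ++ cur :: nxt :: rest = (pre ++ [cur]) ++ (nxt :: rest) := by
        simp
      have hplen : ((pre ++ [cur]).length : Int) = (pre.length : Int) + 1 := by simp
      rw [hrec, ← hplen]
      rw [ih (pre ++ [cur]) (acc ++ [cur.dropLast ++ [nt - ct]])
        (fun l hl => hpre l (by simp [hl]))]
      simp [pairSpec, hct, hnt]

-- ===== VERDICT (by name: the statement is the Claim_ definition above) =====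
theorem event_time_to_delay_spec : Claim_equal_event_time_to_delay := by
  intro record _ hpre
  unfold Spec_event_time_to_delay
  rw [alt_eq_pairSpec]
  have := loopA_eq_pairSpec record [] [] hpre
  simpa [event_time_to_delay] using this
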